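-- pv_equiv track=rewrite | github.com/Eufalo/Machine-Learning | controlador_Index.py | splitStringMax
-- ===== SOURCE A (Python) =====
-- def splitStringMax(si, limit):
--    ls = si.split()
--    lo=[]
--    st=''
--    ln=len(ls)
--    if ln==1:
--        return [si]
--    i=0
--    for l in ls:
--        st+=l
--        i+=1
--        if i <ln:
--            lk=len(ls[i])
--            if (len(st))+1+lk < limit:
--                st+=' '
--                continue
--        lo.append(st);st=''
--    return lo
-- ===== SOURCE B (Python) =====
-- def splitStringMax(si, limit):
--     ws = si.split()
--     if len(ws) == 1:
--         return [si]
--     n = len(ws)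
--     # key[e] = len(ws[0]) + ... + len(ws[e]) + e  (strictly increasing);
--     # a line starting at word i absorbs word e (e > i) iff key[e] < limit + key[i] - len(ws[i])
--     key = []
--     total = 0
--     for e, w in enumerate(ws):
--         total += len(w)
--         key.append(total + e)
--     out = []
--     i = 0
--     while i < n:
--         target = limit + key[i] - len(ws[i])
--         # binary search (key is strictly increasing): largest e in [i+1, n-1]
--         # with key[e] < target, or i if there is none
--         lo, hi, e = i + 1, n - 1, i
--         while lo <= hi:
--             mid = (lo + hi) // 2
--             if key[mid] < target:
--                 e, lo = mid, mid + 1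
--             else:
--                 hi = mid - 1
--         out.append(' '.join(ws[i:e + 1]))
--         i = e + 1
--     return out
-- ===== Notes on version B (the rewrite author's own statement) =====
-- stated objective: alternative
-- what changed: Replaces A's word-by-word greedy with carried string state and next-word lookahead by a prefix-sum formulation: one pass builds key[e] = sum of word lengths + e, then each line's end index is found by binary search on this strictly increasing array and the line is produced with ' '.join over a slice, so no per-word string growing or lookahead indexing remains.
import Mathlib
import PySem

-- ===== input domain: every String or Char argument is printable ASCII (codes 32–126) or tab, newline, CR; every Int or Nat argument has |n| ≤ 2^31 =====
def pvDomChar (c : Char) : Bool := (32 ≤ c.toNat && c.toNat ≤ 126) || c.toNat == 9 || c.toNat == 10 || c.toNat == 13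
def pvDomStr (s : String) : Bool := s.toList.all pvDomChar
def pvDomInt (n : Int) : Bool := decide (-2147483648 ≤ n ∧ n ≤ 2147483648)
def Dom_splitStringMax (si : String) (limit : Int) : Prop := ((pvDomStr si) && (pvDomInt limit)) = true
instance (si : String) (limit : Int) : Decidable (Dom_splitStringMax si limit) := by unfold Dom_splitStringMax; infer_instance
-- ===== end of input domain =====

-- B replaces A's word-by-word greedy (carried string state, next-word lookahead via ls[i]) by a
-- prefix-sum formulation: one pass builds key[e] = (sum of word lengths up to e) + e, each line's
-- end index is found by binary search on this strictly increasing array, and the line text is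
-- produced by ' '.join over a slice — a different algorithm of similar cost ("alternative").

-- ===== PORT A =====
-- A's for-loop with accumulators (lo, st, i); ls[i] is ported as pyGetD (i is always in range when A reads it).
def splitStringMax (si : String) (limit : Int) : List String :=
  let ls := PySem.Str.split₀ si
  let ln : Int := ls.length
  if ln == 1 then [si]
  else
    (ls.foldl (fun (acc : List String × String × Int) l =>
        let st := acc.2.1 ++ l
        let i := acc.2.2 + 1
        if i < ln then
          let lk := PySem.Str.len (PySem.List.pyGetD ls i "")
          if PySem.Str.len st + 1 + lk < limit then (acc.1, st ++ " ", i)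
          else (acc.1 ++ [st], "", i)
        else (acc.1 ++ [st], "", i)) ([], "", 0)).1

-- ===== PORT B =====
-- Source B's inner binary search: largest e in [lo, hi] with key[e] < target, else the initial e.
-- Structural recursion on a fuel bound (hi - lo + 1 strictly decreases each iteration, so the
-- initial fuel of the wrapper below is never exhausted); the loop body is Source B's, step for step.
def pvBsearchGo (key : List Int) (target : Int) : Nat → Int → Int → Int → Int
  | 0, _, _, e => e
  | fuel + 1, lo, hi, e =>
    if lo ≤ hi then
      let mid := PySem.Int.floordiv (lo + hi) 2
      if PySem.List.pyGetD key mid 0 < target then pvBsearchGo key target fuel (mid + 1) hi mid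
      else pvBsearchGo key target fuel lo (mid - 1) e
    else e

def pvBsearch (key : List Int) (target : Int) (lo hi e : Int) : Int :=
  pvBsearchGo key target (hi - lo + 1).toNat lo hi e

-- Source B's outer while loop: one line per iteration, produced by ' '.join over a slice
-- (fuel bound n - i; i strictly increases each iteration, so the wrapper's fuel suffices).
def pvOuterGo (ws : List String) (key : List Int) (limit n : Int) : Nat → Int → List String → List String
  | 0, _, out => out
  | fuel + 1, i, out =>
    if i < n then
      let target := limit + PySem.List.pyGetD key i 0 - PySem.Str.len (PySem.List.pyGetD ws i "")
      let e := pvBsearch key target (i + 1) (n - 1) i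
      pvOuterGo ws key limit n fuel (e + 1) (out ++ [PySem.Str.join " " (PySem.List.slice ws (some i) (some (e + 1)))])
    else out

def pvOuter (ws : List String) (key : List Int) (limit n i : Int) (out : List String) : List String :=
  pvOuterGo ws key limit n (n - i).toNat i out

def splitStringMax_alt (si : String) (limit : Int) : List String :=
  let ws := PySem.Str.split₀ si
  if ws.length == 1 then [si]
  else
    let n : Int := ws.length
    let p := (PySem.List.enumerate ws).foldl (fun (acc : List Int × Int) ew =>
        let total := acc.2 + PySem.Str.len ew.2
        (acc.1 ++ [total + ew.1], total)) ([], 0)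
    pvOuter ws p.1 limit n 0 []

-- ===== PRECONDITION & SPEC =====
def Spec_splitStringMax (si : String) (limit : Int) (out : List String) : Prop := out = splitStringMax_alt si limit
instance (si : String) (limit : Int) (out : List String) : Decidable (Spec_splitStringMax si limit out) := by unfold Spec_splitStringMax; infer_instance

-- ===== CLAIM (what is proved, stated in full; the proofs are below) =====
def Claim_equal_splitStringMax : Prop := ∀ (si : String) (limit : Int), Dom_splitStringMax si limit → Spec_splitStringMax si limit (splitStringMax si limit)

-- ===== LEMMAS AND PROOFS =====

-- prefix sums of word lengths
def pvS (ws : List String) (k : Nat) : Int := ((ws.take k).map PySem.Str.len).sum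

-- "word e can still join a line that starts at word i"
abbrev pvP (ws : List String) (limit : Int) (i e : Nat) : Prop :=
  pvS ws (e + 1) + e < limit + pvS ws i + i

-- last word of the line starting at word i (reference greedy scan)
def pvNextBreak (ws : List String) (limit : Int) (i e : Nat) : Nat :=
  if h : e + 1 < ws.length ∧ pvP ws limit i (e + 1) then pvNextBreak ws limit i (e + 1) else e
termination_by ws.length - e
decreasing_by omega

theorem pvNextBreak_ge (ws : List String) (limit : Int) (i e : Nat) :
    e ≤ pvNextBreak ws limit i e := by
  fun_induction pvNextBreak ws limit i e with
  | case1 e h ih => omega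
  | case2 e h => omega

-- the words ws[i..e] joined with single spaces
def pvJoinWords : List String → String
  | [] => ""
  | [w] => w
  | w :: x :: rest => w ++ " " ++ pvJoinWords (x :: rest)

def pvJ (ws : List String) (i e : Nat) : String := pvJoinWords ((ws.drop i).take (e + 1 - i))

-- reference list of lines from word i on
def pvLines (ws : List String) (limit : Int) (i : Nat) : List String :=
  if h : i < ws.length then
    pvJ ws i (pvNextBreak ws limit i i) :: pvLines ws limit (pvNextBreak ws limit i i + 1)
  else []
termination_by ws.length - i
decreasing_by have := pvNextBreak_ge ws limit i i; omega

theorem pvS_succ (ws : List String) (i : Nat) (h : i < ws.length) :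
    pvS ws (i + 1) = pvS ws i + PySem.Str.len (ws[i]'h) := by
  unfold pvS
  rw [List.take_add_one, List.map_append, List.sum_append]
  simp [List.getElem?_eq_getElem h]

theorem pvS_le (ws : List String) (a b : Nat) (hab : a ≤ b) : pvS ws a ≤ pvS ws b := by
  unfold pvS
  have hb : b = a + (b - a) := by omega
  rw [hb, List.take_add, List.map_append, List.sum_append]
  have : 0 ≤ (((ws.drop a).take (b - a)).map PySem.Str.len).sum := by
    apply List.sum_nonneg
    intro x hx
    obtain ⟨y, -, rfl⟩ := List.mem_map.mp hx
    simp [PySem.Str.len]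
  omega

theorem pvP_anti (ws : List String) (limit : Int) (i e f : Nat) (hef : e ≤ f)
    (hf : pvP ws limit i f) : pvP ws limit i e := by
  unfold pvP at *
  have h1 := pvS_le ws (e + 1) (f + 1) (by omega)
  have h2 : (e : Int) ≤ (f : Int) := by exact_mod_cast hef
  omega

theorem pvJoinWords_eq_join (l : List String) : PySem.Str.join " " l = pvJoinWords l := by
  induction l with
  | nil =>
    apply String.toList_inj.mp
    simp [PySem.Str.toList_join, PySem.Chars.join, pvJoinWords, List.intercalate]
  | cons w t ih =>
    cases t with
    | nil =>
      apply String.toList_inj.mp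
      simp [PySem.Str.toList_join, PySem.Chars.join, pvJoinWords, List.intercalate]
    | cons x rest =>
      apply String.toList_inj.mp
      rw [pvJoinWords]
      simp only [PySem.Str.toList_join, List.map_cons, PySem.Chars.join_cons_cons]
      have hj : PySem.Chars.join " ".toList (x.toList :: List.map String.toList rest)
          = (PySem.Str.join " " (x :: rest)).toList := by
        rw [PySem.Str.toList_join]; rfl
      rw [hj, ih]
      simp

theorem pvJoinWords_snoc (l : List String) (x : String) (h : l ≠ []) :
    pvJoinWords (l ++ [x]) = pvJoinWords l ++ " " ++ x := by
  induction l with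
  | nil => simp at h
  | cons w t ih =>
    cases t with
    | nil => rfl
    | cons y rest =>
      have := ih (by simp)
      simp only [List.cons_append] at this ⊢
      rw [pvJoinWords, this, pvJoinWords]
      simp [String.append_assoc]

theorem pvJ_self (ws : List String) (i : Nat) (h : i < ws.length) : pvJ ws i i = ws[i]'h := by
  unfold pvJ
  have h1 : i + 1 - i = 1 := by omega
  rw [h1, List.drop_eq_getElem_cons h, List.take_succ_cons, List.take_zero]
  rfl

theorem pvJ_succ (ws : List String) (i j : Nat) (hij : i ≤ j) (h : j + 1 < ws.length) :
    pvJ ws i (j + 1) = pvJ ws i j ++ " " ++ ws[j + 1]'h := by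
  unfold pvJ
  have h1 : j + 1 + 1 - i = (j + 1 - i) + 1 := by omega
  rw [h1, List.take_add_one, List.getElem?_drop]
  have h2 : i + (j + 1 - i) = j + 1 := by omega
  rw [h2, List.getElem?_eq_getElem h]
  apply pvJoinWords_snoc
  have hlen : ((ws.drop i).take (j + 1 - i)).length = j + 1 - i := by
    rw [List.length_take, List.length_drop]
    omega
  intro hnil
  rw [hnil] at hlen
  simp at hlen
  omega

theorem pvLenJ (ws : List String) (i j : Nat) (hij : i ≤ j) (h : j < ws.length) :
    PySem.Str.len (pvJ ws i j) = pvS ws (j + 1) - pvS ws i + j - i := by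
  have main : ∀ (d i : Nat), i + d < ws.length →
      PySem.Str.len (pvJ ws i (i + d)) = pvS ws (i + d + 1) - pvS ws i + d := by
    intro d
    induction d with
    | zero =>
      intro i hi
      rw [Nat.add_zero, pvJ_self ws i hi, pvS_succ ws i hi]
      push_cast
      ring
    | succ d ih =>
      intro i hi
      have hd : i + d < ws.length := by omega
      have hstep : i + d + 1 < ws.length := by omega
      rw [show i + (d + 1) = (i + d) + 1 from by omega,
          pvJ_succ ws i (i + d) (by omega) hstep,
          PySem.Str.len_append, PySem.Str.len_append, ih i hd,
          pvS_succ ws (i + d + 1) hstep]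
      have hsp : PySem.Str.len " " = 1 := by decide
      rw [hsp]
      push_cast
      ring
  have hd : j = i + (j - i) := by omega
  rw [hd] at h ⊢
  rw [main (j - i) i h]
  push_cast
  ring

-- pvNextBreak from i is determined by: a witness r with the chain property and the stop property
theorem pvNextBreak_char (ws : List String) (limit : Int) (i r : Nat)
    (hir : i ≤ r) (hr : r < ws.length)
    (hchain : r = i ∨ pvP ws limit i r)
    (hstop : ∀ e : Nat, r < e → e < ws.length → ¬ pvP ws limit i e) :
    pvNextBreak ws limit i i = r := by
  have aux : ∀ (d e : Nat), i ≤ e → e ≤ r → r - e = d → pvNextBreak ws limit i e = r := by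
    intro d
    induction d with
    | zero =>
      intro e hie her hd
      have he : e = r := by omega
      subst he
      rw [pvNextBreak]
      rw [dif_neg]
      rintro ⟨h1, h2⟩
      exact hstop (e + 1) (by omega) h1 h2
    | succ d ih =>
      intro e hie her hd
      have helt : e < r := by omega
      have hcond : pvP ws limit i (e + 1) := by
        rcases hchain with hc | hc
        · omega
        · exact pvP_anti ws limit i (e + 1) r (by omega) hc
      rw [pvNextBreak, dif_pos ⟨by omega, hcond⟩]
      exact ih (e + 1) (by omega) (by omega) (by omega)
  exact aux (r - i) i (le_refl i) hir rfl

-- B's loop with an arbitrary out-prefix: the out accumulator only ever grows on the right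
theorem foldB_out_prefix (limit : Int) (l : List String) (o : List String) (line : String) :
    l.foldl (fun (acc : List String × String) x =>
        if PySem.Str.len acc.2 + 1 + PySem.Str.len x < limit then (acc.1, acc.2 ++ " " ++ x)
        else (acc.1 ++ [acc.2], x)) (o, line)
      = (o ++ (l.foldl (fun (acc : List String × String) x =>
          if PySem.Str.len acc.2 + 1 + PySem.Str.len x < limit then (acc.1, acc.2 ++ " " ++ x)
          else (acc.1 ++ [acc.2], x)) ([], line)).1,
         (l.foldl (fun (acc : List String × String) x =>
          if PySem.Str.len acc.2 + 1 + PySem.Str.len x < limit then (acc.1, acc.2 ++ " " ++ x)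
          else (acc.1 ++ [acc.2], x)) ([], line)).2) := by
  induction l generalizing o line with
  | nil => simp
  | cons x t ih =>
    simp only [List.foldl_cons]
    by_cases hc : PySem.Str.len line + 1 + PySem.Str.len x < limit
    · rw [if_pos hc, if_pos hc, ih]
    · rw [if_neg hc, if_neg hc, ih (o ++ [line]), ih ([] ++ [line])]
      simp

-- A's fold from index k equals the reference two-accumulator fold over the remaining words
theorem key_lemma (ls : List String) (limit : Int) :
    ∀ (k : Nat) (hk : k < ls.length) (st : String) (lo : List String),
    ((ls.drop k).foldl (fun (acc : List String × String × Int) l =>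
        let st := acc.2.1 ++ l
        let i := acc.2.2 + 1
        if i < (ls.length : Int) then
          let lk := PySem.Str.len (PySem.List.pyGetD ls i "")
          if PySem.Str.len st + 1 + lk < limit then (acc.1, st ++ " ", i)
          else (acc.1 ++ [st], "", i)
        else (acc.1 ++ [st], "", i)) (lo, st, (k : Int))).1
      = lo ++ (let p := (ls.drop (k + 1)).foldl (fun (acc : List String × String) x =>
            if PySem.Str.len acc.2 + 1 + PySem.Str.len x < limit then (acc.1, acc.2 ++ " " ++ x)
            else (acc.1 ++ [acc.2], x)) ([], st ++ ls[k]'hk)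
          p.1 ++ [p.2]) := by
  have main : ∀ (n k : Nat), ls.length - k = n → ∀ (hk : k < ls.length) (st : String) (lo : List String),
      ((ls.drop k).foldl (fun (acc : List String × String × Int) l =>
        let st := acc.2.1 ++ l
        let i := acc.2.2 + 1
        if i < (ls.length : Int) then
          let lk := PySem.Str.len (PySem.List.pyGetD ls i "")
          if PySem.Str.len st + 1 + lk < limit then (acc.1, st ++ " ", i)
          else (acc.1 ++ [st], "", i)
        else (acc.1 ++ [st], "", i)) (lo, st, (k : Int))).1
      = lo ++ (let p := (ls.drop (k + 1)).foldl (fun (acc : List String × String) x =>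
            if PySem.Str.len acc.2 + 1 + PySem.Str.len x < limit then (acc.1, acc.2 ++ " " ++ x)
            else (acc.1 ++ [acc.2], x)) ([], st ++ ls[k]'hk)
          p.1 ++ [p.2]) := by
    intro n
    induction n with
    | zero => intro k h hk; omega
    | succ n ih =>
      intro k h hk st lo
      rw [List.drop_eq_getElem_cons hk, List.foldl_cons]
      by_cases hkl : k + 1 < ls.length
      · have hilt : ((k : Int) + 1 < (ls.length : Int)) := by exact_mod_cast hkl
        rw [if_pos hilt]
        have hget : PySem.List.pyGetD ls ((k : Int) + 1) "" = ls[k+1]'hkl := by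
          have : ((k : Int) + 1) = ((k + 1 : Nat) : Int) := by push_cast; ring
          rw [this, PySem.List.pyGetD_natCast, List.getD_eq_getElem?_getD,
              List.getElem?_eq_getElem hkl, Option.getD_some]
        rw [hget]
        have hcast : (k : Int) + 1 = ((k + 1 : Nat) : Int) := by push_cast; ring
        conv_rhs => rw [List.drop_eq_getElem_cons hkl, List.foldl_cons]
        by_cases hc : PySem.Str.len (st ++ ls[k]'hk) + 1 + PySem.Str.len (ls[k+1]'hkl) < limit
        · rw [if_pos hc, hcast, ih (k + 1) (by omega) hkl]
          rw [if_pos hc]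
        · rw [if_neg hc, hcast, ih (k + 1) (by omega) hkl]
          rw [if_neg hc]
          have hfb := foldB_out_prefix limit (ls.drop (k + 1 + 1)) [st ++ ls[k]'hk] (ls[k+1]'hkl)
          rw [Prod.ext_iff] at hfb
          simp [String.empty_append] at hfb ⊢
          rw [hfb.1, hfb.2]
          simp
      · have hilt : ¬ ((k : Int) + 1 < (ls.length : Int)) := by
          intro hx; exact hkl (by exact_mod_cast hx)
        rw [if_neg hilt]
        have hdrop : ls.drop (k + 1) = [] := List.drop_eq_nil_of_le (by omega)
        rw [hdrop, List.foldl_nil]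
        simp
  intro k hk st lo
  exact main (ls.length - k) k rfl hk st lo

-- the reference fold started on a partially built line equals pvLines
theorem fold_eq_lines (ws : List String) (limit : Int) :
    ∀ (n0 i j : Nat), ws.length - j = n0 → i ≤ j → (hj : j < ws.length) →
    (∀ e : Nat, i < e → e ≤ j → pvP ws limit i e) →
    ((ws.drop (j + 1)).foldl (fun (acc : List String × String) x =>
        if PySem.Str.len acc.2 + 1 + PySem.Str.len x < limit then (acc.1, acc.2 ++ " " ++ x)
        else (acc.1 ++ [acc.2], x)) ([], pvJ ws i j)).1
      ++ [((ws.drop (j + 1)).foldl (fun (acc : List String × String) x =>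
        if PySem.Str.len acc.2 + 1 + PySem.Str.len x < limit then (acc.1, acc.2 ++ " " ++ x)
        else (acc.1 ++ [acc.2], x)) ([], pvJ ws i j)).2] = pvLines ws limit i := by
  intro n0
  induction n0 with
  | zero => intro i j hn hij hj hchain; omega
  | succ n0 ih =>
    intro i j hn hij hj hchain
    have hchain' : j = i ∨ pvP ws limit i j := by
      rcases Nat.eq_or_lt_of_le hij with h | h
      · exact Or.inl h.symm
      · exact Or.inr (hchain j h (le_refl j))
    by_cases hj1 : j + 1 < ws.length
    · have hcond_iff : (PySem.Str.len (pvJ ws i j) + 1 + PySem.Str.len (ws[j + 1]'hj1) < limit)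
          ↔ pvP ws limit i (j + 1) := by
        have hlen := pvLenJ ws i j hij (by omega)
        have h1 := pvS_succ ws (j + 1) hj1
        unfold pvP
        constructor <;> intro <;> omega
      rw [List.drop_eq_getElem_cons hj1]
      simp only [List.foldl_cons]
      by_cases hc : PySem.Str.len (pvJ ws i j) + 1 + PySem.Str.len (ws[j + 1]'hj1) < limit
      · rw [if_pos hc, ← pvJ_succ ws i j hij hj1]
        exact ih i (j + 1) (by omega) (by omega) hj1 (by
          intro e he1 he2
          rcases Nat.eq_or_lt_of_le he2 with h | h
          · rw [h]; exact hcond_iff.mp hc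
          · exact hchain e he1 (by omega))
      · rw [if_neg hc]
        have hfb := foldB_out_prefix limit (ws.drop (j + 1 + 1)) ([] ++ [pvJ ws i j]) (ws[j + 1]'hj1)
        rw [Prod.ext_iff] at hfb
        rw [hfb.1, hfb.2]
        have hself : ws[j + 1]'hj1 = pvJ ws (j + 1) (j + 1) := (pvJ_self ws (j + 1) hj1).symm
        rw [hself]
        have hrec := ih (j + 1) (j + 1) (by omega) (le_refl _) hj1 (by intro e he1 he2; omega)
        have hnb : pvNextBreak ws limit i i = j := by
          apply pvNextBreak_char ws limit i j hij (by omega) hchain'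
          intro e he1 he2 hp
          have : pvP ws limit i (j + 1) := pvP_anti ws limit i (j + 1) e (by omega) hp
          exact hc (hcond_iff.mpr this)
        rw [pvLines, dif_pos (by omega : i < ws.length), hnb]
        rw [← hrec]
        simp
    · have hjlen : j = ws.length - 1 := by omega
      have hdrop : ws.drop (j + 1) = [] := List.drop_eq_nil_of_le (by omega)
      rw [hdrop, List.foldl_nil]
      have hnb : pvNextBreak ws limit i i = j := by
        apply pvNextBreak_char ws limit i j hij (by omega) hchain'
        intro e he1 he2
        omega
      rw [pvLines, dif_pos (by omega : i < ws.length), hnb]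
      rw [pvLines, dif_neg (by omega : ¬ (j + 1 < ws.length))]
      simp

-- the key array built by B's first loop
theorem build_key (ws : List String) :
    ∀ (start : Int) (key0 : List Int) (t0 : Int),
    (PySem.List.enumerate ws start).foldl (fun (acc : List Int × Int) ew =>
        let total := acc.2 + PySem.Str.len ew.2
        (acc.1 ++ [total + ew.1], total)) (key0, t0)
      = (key0 ++ (List.range ws.length).map (fun e => t0 + pvS ws (e + 1) + start + e),
         t0 + pvS ws ws.length) := by
  intro start key0 t0
  induction ws generalizing start key0 t0 with
  | nil => simp [PySem.List.enumerate, pvS]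
  | cons w rest ih =>
    have henum : PySem.List.enumerate (w :: rest) start = (start, w) :: PySem.List.enumerate rest (start + 1) := rfl
    rw [henum, List.foldl_cons]
    simp only
    rw [ih (start + 1)]
    have hS : ∀ k : Nat, pvS (w :: rest) (k + 1) = PySem.Str.len w + pvS rest k := by
      intro k; simp [pvS]
    simp only [Prod.mk.injEq]
    constructor
    · rw [List.length_cons, List.range_succ_eq_map, List.map_cons, List.map_map]
      rw [List.append_assoc]
      congr 1
      rw [List.singleton_append]
      congr 1
      · rw [hS 0, pvS]
        simp
      · apply List.map_congr_left
        intro e _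
        simp only [Function.comp_apply, Nat.succ_eq_add_one, hS (e + 1)]
        push_cast
        ring
    · rw [List.length_cons, hS rest.length]
      ring

-- value of the key array at an in-range index
theorem key_getD (ws : List String) (e : Nat) (he : e < ws.length) :
    PySem.List.pyGetD ((List.range ws.length).map (fun e => pvS ws (e + 1) + (e : Int))) (e : Int) 0
      = pvS ws (e + 1) + e := by
  rw [PySem.List.pyGetD_natCast, List.getD_eq_getElem?_getD, List.getElem?_map,
      List.getElem?_range he]
  rfl

-- binary-search correctness, stated against the reference predicate pvP
theorem bs_main (ws : List String) (limit : Int) (i : Nat) :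
    ∀ (fuel : Nat) (lo hi' : Int) (resN : Nat), (hi' - lo + 1).toNat ≤ fuel →
    (i : Int) + 1 ≤ lo → lo = (resN : Int) + 1 → hi' ≤ (ws.length : Int) - 1 →
    (resN = i ∨ (resN < ws.length ∧ pvP ws limit i resN)) →
    (∀ e : Nat, hi' < (e : Int) → e < ws.length → ¬ pvP ws limit i e) →
    ∃ rN : Nat, pvBsearchGo ((List.range ws.length).map (fun e => pvS ws (e + 1) + (e : Int)))
        (limit + pvS ws i + i) fuel lo hi' resN = (rN : Int) ∧
      i ≤ rN ∧ (rN = i ∨ (rN < ws.length ∧ pvP ws limit i rN)) ∧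
      (∀ e : Nat, rN < e → e < ws.length → ¬ pvP ws limit i e) := by
  intro fuel
  induction fuel with
  | zero =>
    intro lo hi' resN hfuel hlo hloeq hhi hres hstop
    refine ⟨resN, rfl, by omega, hres, ?_⟩
    intro e hre hel
    exact hstop e (by omega) hel
  | succ fuel ih =>
    intro lo hi' resN hfuel hlo hloeq hhi hres hstop
    by_cases hlh : lo ≤ hi'
    · have hb := PySem.Int.floordiv_two_mid_bounds hlh
      have hstep : pvBsearchGo ((List.range ws.length).map (fun e => pvS ws (e + 1) + (e : Int)))
            (limit + pvS ws i + i) (fuel + 1) lo hi' resN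
          = if PySem.List.pyGetD ((List.range ws.length).map (fun e => pvS ws (e + 1) + (e : Int)))
                (PySem.Int.floordiv (lo + hi') 2) 0 < limit + pvS ws i + i then
              pvBsearchGo ((List.range ws.length).map (fun e => pvS ws (e + 1) + (e : Int)))
                (limit + pvS ws i + i) fuel (PySem.Int.floordiv (lo + hi') 2 + 1) hi'
                (PySem.Int.floordiv (lo + hi') 2)
            else
              pvBsearchGo ((List.range ws.length).map (fun e => pvS ws (e + 1) + (e : Int)))
                (limit + pvS ws i + i) fuel lo (PySem.Int.floordiv (lo + hi') 2 - 1) resN := by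
        rw [pvBsearchGo, if_pos hlh]
      rw [hstep]
      generalize hg : PySem.Int.floordiv (lo + hi') 2 = mid at hb ⊢
      obtain ⟨hbl, hbr⟩ := hb
      have hmid0 : 0 ≤ mid := by omega
      have hmidlen : mid.toNat < ws.length := by omega
      have hmidcast : mid = ((mid.toNat : Nat) : Int) := (Int.toNat_of_nonneg hmid0).symm
      have hkey : PySem.List.pyGetD ((List.range ws.length).map (fun e => pvS ws (e + 1) + (e : Int)))
          mid 0 = pvS ws (mid.toNat + 1) + mid.toNat := by
        rw [hmidcast]; exact key_getD ws mid.toNat hmidlen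
      by_cases hq : pvP ws limit i mid.toNat
      · rw [if_pos (by rw [hkey]; exact hq)]
        rw [hmidcast]
        exact ih ((mid.toNat : Int) + 1) hi' mid.toNat (by omega) (by omega) rfl hhi
          (Or.inr ⟨hmidlen, hq⟩) hstop
      · rw [if_neg (by rw [hkey]; exact hq)]
        refine ih lo (mid - 1) resN (by omega) hlo hloeq (by omega) hres ?_
        intro e he1 he2 hp
        exact hq (pvP_anti ws limit i mid.toNat e (by omega) hp)
    · refine ⟨resN, ?_, by omega, hres, ?_⟩
      · rw [pvBsearchGo, if_neg hlh]
      · intro e hre hel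
        exact hstop e (by omega) hel

-- B's outer loop produces the reference lines
theorem outer_eq (ws : List String) (limit : Int) :
    ∀ (fuel i : Nat) (out : List String), ws.length - i ≤ fuel →
    pvOuterGo ws ((List.range ws.length).map (fun e => pvS ws (e + 1) + (e : Int))) limit
        (ws.length : Int) fuel (i : Int) out = out ++ pvLines ws limit i := by
  intro fuel
  induction fuel with
  | zero =>
    intro i out hf
    show out = out ++ pvLines ws limit i
    rw [pvLines, dif_neg (by omega : ¬ (i < ws.length))]
    simp
  | succ fuel ih =>
    intro i out hf
    by_cases hin : i < ws.length
    · have hstep : pvOuterGo ws ((List.range ws.length).map (fun e => pvS ws (e + 1) + (e : Int)))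
            limit (ws.length : Int) (fuel + 1) (i : Int) out
          = pvOuterGo ws ((List.range ws.length).map (fun e => pvS ws (e + 1) + (e : Int))) limit
              (ws.length : Int) fuel
              (pvBsearch ((List.range ws.length).map (fun e => pvS ws (e + 1) + (e : Int)))
                (limit + PySem.List.pyGetD ((List.range ws.length).map (fun e => pvS ws (e + 1) + (e : Int))) (i : Int) 0
                  - PySem.Str.len (PySem.List.pyGetD ws (i : Int) ""))
                ((i : Int) + 1) ((ws.length : Int) - 1) (i : Int) + 1)
              (out ++ [PySem.Str.join " " (PySem.List.slice ws (some (i : Int))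
                (some (pvBsearch ((List.range ws.length).map (fun e => pvS ws (e + 1) + (e : Int)))
                  (limit + PySem.List.pyGetD ((List.range ws.length).map (fun e => pvS ws (e + 1) + (e : Int))) (i : Int) 0
                    - PySem.Str.len (PySem.List.pyGetD ws (i : Int) ""))
                  ((i : Int) + 1) ((ws.length : Int) - 1) (i : Int) + 1)))]) := by
        rw [pvOuterGo, if_pos (by omega : (i : Int) < (ws.length : Int))]
      have hws : PySem.List.pyGetD ws (i : Int) "" = ws[i]'hin := by
        rw [PySem.List.pyGetD_natCast, List.getD_eq_getElem?_getD, List.getElem?_eq_getElem hin,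
            Option.getD_some]
      have hTT : limit + PySem.List.pyGetD ((List.range ws.length).map (fun e => pvS ws (e + 1) + (e : Int))) (i : Int) 0
          - PySem.Str.len (PySem.List.pyGetD ws (i : Int) "") = limit + pvS ws i + (i : Int) := by
        rw [key_getD ws i hin, hws]
        have := pvS_succ ws i hin
        omega
      rw [hTT] at hstep
      simp only [pvBsearch] at hstep
      rw [hstep]
      obtain ⟨rN, hbs, hirN, hresN, hstopN⟩ := bs_main ws limit i
        ((ws.length : Int) - 1 - ((i : Int) + 1) + 1).toNat ((i : Int) + 1) ((ws.length : Int) - 1) i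
        (le_refl _) (le_refl _) rfl (le_refl _) (Or.inl rfl) (by intro e he1 he2; omega)
      rw [show ((ws.length : Int) - 1 - ((i : Int) + 1) + 1) = ((ws.length : Int) - 1 - ((i : Int) + 1) + 1) from rfl] at hbs
      rw [hbs]
      have hrNlen : rN < ws.length := by
        rcases hresN with h | h
        · omega
        · exact h.1
      have hnb : pvNextBreak ws limit i i = rN := by
        apply pvNextBreak_char ws limit i rN hirN hrNlen
        · rcases hresN with h | h
          · exact Or.inl h
          · exact Or.inr h.2
        · exact hstopN
      have hcast : (rN : Int) + 1 = ((rN + 1 : Nat) : Int) := by push_cast; ring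
      rw [hcast, PySem.List.slice_natCast]
      have hJ : PySem.Str.join " " ((ws.drop i).take (rN + 1 - i)) = pvJ ws i rN := by
        rw [pvJoinWords_eq_join]; rfl
      rw [hJ]
      rw [pvLines, dif_pos hin, hnb]
      rw [ih (rN + 1) (out ++ [pvJ ws i rN]) (by omega)]
      simp
    · have hstep2 : pvOuterGo ws ((List.range ws.length).map (fun e => pvS ws (e + 1) + (e : Int)))
            limit (ws.length : Int) (fuel + 1) (i : Int) out = out := by
        rw [pvOuterGo, if_neg (by omega : ¬ ((i : Int) < (ws.length : Int)))]
      rw [hstep2, pvLines, dif_neg hin]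
      simp

-- ===== VERDICT (by name: the statement is the Claim_ definition above) =====
theorem splitStringMax_spec : Claim_equal_splitStringMax := by
  intro si limit _
  unfold Spec_splitStringMax splitStringMax splitStringMax_alt
  simp only
  by_cases hg : ((PySem.Str.split₀ si).length : Int) == 1
  · have hg2 : ((PySem.Str.split₀ si).length == 1) = true := by
      simp at hg ⊢; exact_mod_cast hg
    rw [if_pos hg, if_pos hg2]
  · have hg2 : ((PySem.Str.split₀ si).length == 1) = false := by
      simp at hg ⊢; exact_mod_cast hg
    rw [if_neg (by simpa using hg), if_neg (by simp [hg2])]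
    have hkeyeq : ((PySem.List.enumerate (PySem.Str.split₀ si)).foldl (fun (acc : List Int × Int) ew =>
          let total := acc.2 + PySem.Str.len ew.2
          (acc.1 ++ [total + ew.1], total)) ([], 0)).1
        = (List.range (PySem.Str.split₀ si).length).map
            (fun e => pvS (PySem.Str.split₀ si) (e + 1) + (e : Int)) := by
      rw [build_key]
      simp
    rw [hkeyeq]
    have houter := outer_eq (PySem.Str.split₀ si) limit (PySem.Str.split₀ si).length 0 [] (by omega)
    simp only [Nat.cast_zero, List.nil_append] at houter
    rw [pvOuter, show (((PySem.Str.split₀ si).length : Int) - 0).toNat = (PySem.Str.split₀ si).length from by omega]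
    rw [houter]
    rcases hls : PySem.Str.split₀ si with _ | ⟨w, ws0⟩
    · rw [pvLines, dif_neg (by simp : ¬ (0 < ([] : List String).length))]
      simp
    · rw [← hls]
      have hk : 0 < (PySem.Str.split₀ si).length := by rw [hls]; simp
      have hkey0 := key_lemma (PySem.Str.split₀ si) limit 0 hk "" []
      simp only [List.drop_zero, Nat.cast_zero, List.nil_append] at hkey0
      rw [hkey0]
      have hJ0 : "" ++ (PySem.Str.split₀ si)[0]'hk = pvJ (PySem.Str.split₀ si) 0 0 := by
        rw [String.empty_append, pvJ_self]
      rw [hJ0]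
      simpa using fold_eq_lines (PySem.Str.split₀ si) limit (PySem.Str.split₀ si).length 0 0
        (by omega) (le_refl 0) hk (by intro e he1 he2; omega)
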